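-- pv_equiv track=rewrite | github.com/Wonderlic-AI/wonderlic_nlp | wonderlic_nlp/wonderlic.py | get_punct_features
-- ===== SOURCE A (Python) =====
-- import string
--
-- def get_punct_features(document):
--     puncts = [char for char in document if char in string.punctuation]
--     punct_features = {'Period': puncts.count('.'),
--                       'Comma': puncts.count(','),
--                       'Colon': puncts.count(':'),
--                       'Semic': puncts.count(';'),
--                       'Qmark': puncts.count('?'),
--                       'Exclam': puncts.count('!'),
--                       'Dash': puncts.count('-'),
--                       'Quote': puncts.count('"'),
--                       'Apostro': puncts.count('\''),
--                       'Parenth': puncts.count('(') + puncts.count(')')}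
--     punct_features['Otherp'] = len(puncts) - sum(punct_features.values())
--     punct_features['Allpct'] = len(puncts)
--
--     return {'punct': punct_features}
-- ===== SOURCE B (Python) =====
-- import string
--
-- def get_punct_features(document):
--     period = comma = colon = semic = qmark = exclam = 0
--     dash = quote = apostro = parenth = otherp = allpct = 0
--     for ch in document:
--         if ch in string.punctuation:
--             allpct += 1
--             if ch == '.':
--                 period += 1
--             elif ch == ',':
--                 comma += 1
--             elif ch == ':':
--                 colon += 1
--             elif ch == ';':
--                 semic += 1
--             elif ch == '?':
--                 qmark += 1
--             elif ch == '!':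
--                 exclam += 1
--             elif ch == '-':
--                 dash += 1
--             elif ch == '"':
--                 quote += 1
--             elif ch == "'":
--                 apostro += 1
--             elif ch in '()':
--                 parenth += 1
--             else:
--                 otherp += 1
--     return {'punct': {'Period': period, 'Comma': comma, 'Colon': colon,
--                       'Semic': semic, 'Qmark': qmark, 'Exclam': exclam,
--                       'Dash': dash, 'Quote': quote, 'Apostro': apostro,
--                       'Parenth': parenth, 'Otherp': otherp, 'Allpct': allpct}}
-- ===== Notes on version B (the rewrite author's own statement) =====
-- stated objective: alternative
-- what changed: Replaces A's punctuation pre-filter list plus twelve repeated .count scans (and the subtraction deriving Otherp) with a single pass over the document that classifies each character once into twelve running accumulators, counting Otherp and Allpct directly.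
import Mathlib
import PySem

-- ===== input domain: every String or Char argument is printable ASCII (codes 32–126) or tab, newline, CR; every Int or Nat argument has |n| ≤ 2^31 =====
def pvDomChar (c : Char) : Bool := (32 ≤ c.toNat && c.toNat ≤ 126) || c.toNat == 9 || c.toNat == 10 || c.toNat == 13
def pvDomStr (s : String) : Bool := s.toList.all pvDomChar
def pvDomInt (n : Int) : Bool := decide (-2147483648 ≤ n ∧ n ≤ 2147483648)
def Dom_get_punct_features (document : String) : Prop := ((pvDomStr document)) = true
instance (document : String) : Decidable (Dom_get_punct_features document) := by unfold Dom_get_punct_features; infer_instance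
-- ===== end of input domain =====

-- B replaces A's pre-filter + twelve repeated .count scans (and the Otherp subtraction) with
-- one classifying pass over the document maintaining twelve accumulators (objective: alternative).

-- string.punctuation
def pvPunct : List Char := "!\"#$%&'()*+,-./:;<=>?@[\\]^_`{|}~".toList

-- ===== PORT A =====
def get_punct_features (document : String) : List (String × List (String × Int)) :=
  let puncts := document.toList.filter (fun c => pvPunct.contains c)
  let base : List (String × Int) :=
    [("Period", (puncts.count '.' : Int)),
     ("Comma", (puncts.count ',' : Int)),
     ("Colon", (puncts.count ':' : Int)),
     ("Semic", (puncts.count ';' : Int)),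
     ("Qmark", (puncts.count '?' : Int)),
     ("Exclam", (puncts.count '!' : Int)),
     ("Dash", (puncts.count '-' : Int)),
     ("Quote", (puncts.count '"' : Int)),
     ("Apostro", (puncts.count '\'' : Int)),
     ("Parenth", (puncts.count '(' : Int) + (puncts.count ')' : Int))]
  let pf := base ++ [("Otherp", (puncts.length : Int) - (base.map Prod.snd).sum)]
  let pf := pf ++ [("Allpct", (puncts.length : Int))]
  [("punct", pf)]

-- ===== PORT B =====
-- the twelve accumulators of Source B's loop
structure PvAcc where
  period : Int
  comma : Int
  colon : Int
  semic : Int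
  qmark : Int
  exclam : Int
  dash : Int
  quote : Int
  apostro : Int
  parenth : Int
  otherp : Int
  allpct : Int
deriving Repr, DecidableEq

-- one iteration of Source B's loop body
def pvStep (s : PvAcc) (ch : Char) : PvAcc :=
  if pvPunct.contains ch then
    let s := { s with allpct := s.allpct + 1 }
    if ch = '.' then { s with period := s.period + 1 }
    else if ch = ',' then { s with comma := s.comma + 1 }
    else if ch = ':' then { s with colon := s.colon + 1 }
    else if ch = ';' then { s with semic := s.semic + 1 }
    else if ch = '?' then { s with qmark := s.qmark + 1 }
    else if ch = '!' then { s with exclam := s.exclam + 1 }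
    else if ch = '-' then { s with dash := s.dash + 1 }
    else if ch = '"' then { s with quote := s.quote + 1 }
    else if ch = '\'' then { s with apostro := s.apostro + 1 }
    else if ch = '(' ∨ ch = ')' then { s with parenth := s.parenth + 1 }
    else { s with otherp := s.otherp + 1 }
  else s

def get_punct_features_alt (document : String) : List (String × List (String × Int)) :=
  let r := document.toList.foldl pvStep ⟨0,0,0,0,0,0,0,0,0,0,0,0⟩
  [("punct",
    [("Period", r.period), ("Comma", r.comma), ("Colon", r.colon),
     ("Semic", r.semic), ("Qmark", r.qmark), ("Exclam", r.exclam),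
     ("Dash", r.dash), ("Quote", r.quote), ("Apostro", r.apostro),
     ("Parenth", r.parenth), ("Otherp", r.otherp), ("Allpct", r.allpct)])]

-- ===== PRECONDITION & SPEC =====
def Spec_get_punct_features (document : String) (out : List (String × List (String × Int))) : Prop := out = get_punct_features_alt document
instance (document : String) (out : List (String × List (String × Int))) : Decidable (Spec_get_punct_features document out) := by unfold Spec_get_punct_features; infer_instance

-- ===== CLAIM (what is proved, stated in full; the proofs are below) =====
def Claim_equal_get_punct_features : Prop := ∀ (document : String), Dom_get_punct_features document → Spec_get_punct_features document (get_punct_features document)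

-- ===== LEMMAS AND PROOFS =====

-- the characters Source B's elif chain names explicitly
def pvIsNamed (c : Char) : Bool :=
  c == '.' || c == ',' || c == ':' || c == ';' || c == '?' || c == '!'
    || c == '-' || c == '"' || c == '\'' || c == '(' || c == ')'

-- the loop state summarised as counts over a list
def pvOf (l : List Char) : PvAcc :=
  ⟨(l.count '.' : Int), (l.count ',' : Int), (l.count ':' : Int), (l.count ';' : Int),
   (l.count '?' : Int), (l.count '!' : Int), (l.count '-' : Int), (l.count '"' : Int),
   (l.count '\'' : Int), (l.count '(' : Int) + (l.count ')' : Int),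
   (l.countP (fun c => pvPunct.contains c && !(pvIsNamed c)) : Int),
   (l.countP (fun c => pvPunct.contains c) : Int)⟩

def pvAdd (s t : PvAcc) : PvAcc :=
  ⟨s.period + t.period, s.comma + t.comma, s.colon + t.colon, s.semic + t.semic,
   s.qmark + t.qmark, s.exclam + t.exclam, s.dash + t.dash, s.quote + t.quote,
   s.apostro + t.apostro, s.parenth + t.parenth, s.otherp + t.otherp, s.allpct + t.allpct⟩

lemma pvAdd_assoc (s t u : PvAcc) : pvAdd (pvAdd s t) u = pvAdd s (pvAdd t u) := by
  simp [pvAdd, PvAcc.mk.injEq]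
  refine ⟨?_, ?_, ?_, ?_, ?_, ?_, ?_, ?_, ?_, ?_, ?_, ?_⟩ <;> ring

lemma pvOf_cons (x : Char) (l : List Char) :
    pvOf (x :: l) = pvAdd (pvOf [x]) (pvOf l) := by
  simp only [pvOf, pvAdd, List.count_cons, List.countP_cons, List.count_nil,
    List.countP_nil, PvAcc.mk.injEq]
  refine ⟨?_, ?_, ?_, ?_, ?_, ?_, ?_, ?_, ?_, ?_, ?_, ?_⟩ <;>
    (split_ifs <;> push_cast <;> ring)

-- each step adds the single-character counts
lemma pvStep_add (s : PvAcc) (x : Char) : pvStep s x = pvAdd s (pvOf [x]) := by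
  cases s
  unfold pvStep
  by_cases hp : pvPunct.contains x = true
  case neg =>
    rw [if_neg hp]
    have hne : ∀ c : Char, c ∈ pvPunct → x ≠ c := by
      intro c hc he
      subst he
      exact hp (by simpa using hc)
    have hp' : x ∉ pvPunct := by simpa using hp
    have e : pvOf [x] = ⟨0,0,0,0,0,0,0,0,0,0,0,0⟩ := by
      simp [pvOf, List.count_cons, List.countP_cons, hp',
        hne '.' (by decide), hne ',' (by decide), hne ':' (by decide), hne ';' (by decide),
        hne '?' (by decide), hne '!' (by decide), hne '-' (by decide), hne '\"' (by decide),
        hne '\'' (by decide), hne '(' (by decide), hne ')' (by decide)]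
    rw [e]; simp [pvAdd]
  case pos =>
    rw [if_pos hp]
    by_cases h1 : x = '.'
    · rw [if_pos h1]; subst h1
      have e : pvOf ['.'] = ⟨1,0,0,0,0,0,0,0,0,0,0,1⟩ := by decide
      rw [e]; simp [pvAdd]
    · rw [if_neg h1]
      by_cases h2 : x = ','
      · rw [if_pos h2]; subst h2
        have e : pvOf [','] = ⟨0,1,0,0,0,0,0,0,0,0,0,1⟩ := by decide
        rw [e]; simp [pvAdd]
      · rw [if_neg h2]
        by_cases h3 : x = ':'
        · rw [if_pos h3]; subst h3
          have e : pvOf [':'] = ⟨0,0,1,0,0,0,0,0,0,0,0,1⟩ := by decide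
          rw [e]; simp [pvAdd]
        · rw [if_neg h3]
          by_cases h4 : x = ';'
          · rw [if_pos h4]; subst h4
            have e : pvOf [';'] = ⟨0,0,0,1,0,0,0,0,0,0,0,1⟩ := by decide
            rw [e]; simp [pvAdd]
          · rw [if_neg h4]
            by_cases h5 : x = '?'
            · rw [if_pos h5]; subst h5
              have e : pvOf ['?'] = ⟨0,0,0,0,1,0,0,0,0,0,0,1⟩ := by decide
              rw [e]; simp [pvAdd]
            · rw [if_neg h5]
              by_cases h6 : x = '!'
              · rw [if_pos h6]; subst h6
                have e : pvOf ['!'] = ⟨0,0,0,0,0,1,0,0,0,0,0,1⟩ := by decide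
                rw [e]; simp [pvAdd]
              · rw [if_neg h6]
                by_cases h7 : x = '-'
                · rw [if_pos h7]; subst h7
                  have e : pvOf ['-'] = ⟨0,0,0,0,0,0,1,0,0,0,0,1⟩ := by decide
                  rw [e]; simp [pvAdd]
                · rw [if_neg h7]
                  by_cases h8 : x = '"'
                  · rw [if_pos h8]; subst h8
                    have e : pvOf ['"'] = ⟨0,0,0,0,0,0,0,1,0,0,0,1⟩ := by decide
                    rw [e]; simp [pvAdd]
                  · rw [if_neg h8]
                    by_cases h9 : x = '\''
                    · rw [if_pos h9]; subst h9
                      have e : pvOf ['\''] = ⟨0,0,0,0,0,0,0,0,1,0,0,1⟩ := by decide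
                      rw [e]; simp [pvAdd]
                    · rw [if_neg h9]
                      by_cases h10 : x = '(' ∨ x = ')'
                      · rw [if_pos h10]
                        rcases h10 with h10 | h10 <;> subst h10
                        · have e : pvOf ['('] = ⟨0,0,0,0,0,0,0,0,0,1,0,1⟩ := by decide
                          rw [e]; simp [pvAdd]
                        · have e : pvOf [')'] = ⟨0,0,0,0,0,0,0,0,0,1,0,1⟩ := by decide
                          rw [e]; simp [pvAdd]
                      · rw [if_neg h10]
                        push_neg at h10
                        have hn : pvIsNamed x = false := by
                          simp [pvIsNamed, h1, h2, h3, h4, h5, h6, h7, h8, h9, h10.1, h10.2]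
                        have hp' : x ∈ pvPunct := by simpa using hp
                        have e : pvOf [x] = ⟨0,0,0,0,0,0,0,0,0,0,1,1⟩ := by
                          simp [pvOf, List.count_cons, List.countP_cons, hp', hn,
                            h1, h2, h3, h4, h5, h6, h7, h8, h9, h10.1, h10.2]
                        rw [e]; simp [pvAdd]

lemma pv_fold_eq (l : List Char) : ∀ s : PvAcc, l.foldl pvStep s = pvAdd s (pvOf l) := by
  induction l with
  | nil =>
    intro s
    simp [pvOf, pvAdd]
  | cons x l ih =>
    intro s
    rw [List.foldl_cons, ih, pvStep_add, pvAdd_assoc, ← pvOf_cons]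

-- counting a punctuation character in the punctuation pre-filter counts it in the document
lemma pv_count_filter (l : List Char) (v : Char) (h : pvPunct.contains v = true) :
    (l.filter (fun c => pvPunct.contains c)).count v = l.count v :=
  List.count_filter h

-- splitting a countP by a second predicate
lemma pv_countP_split (l : List Char) (p q : Char → Bool) :
    l.countP p = l.countP (fun c => p c && q c) + l.countP (fun c => p c && !q c) := by
  induction l with
  | nil => simp
  | cons x l ih =>
    simp only [List.countP_cons]
    by_cases hp : p x <;> by_cases hq : q x <;> simp [hp, hq] <;> omega

-- named characters are punctuation
lemma pv_named_mem (c : Char) (h : pvIsNamed c = true) : c ∈ pvPunct := by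
  simp only [pvIsNamed, Bool.or_eq_true, beq_iff_eq] at h
  rcases h with ((((((((((h|h)|h)|h)|h)|h)|h)|h)|h)|h)|h) <;> subst h <;> decide

-- the named count as a sum of individual character counts
lemma pv_countP_named (l : List Char) :
    l.countP pvIsNamed
      = l.count '.' + l.count ',' + l.count ':' + l.count ';' + l.count '?' + l.count '!'
        + l.count '-' + l.count '"' + l.count '\'' + l.count '(' + l.count ')' := by
  induction l with
  | nil => simp
  | cons x l ih =>
    simp only [List.countP_cons, List.count_cons]
    by_cases hx : pvIsNamed x = true
    · rw [hx]
      simp only [pvIsNamed, Bool.or_eq_true, beq_iff_eq] at hx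
      rcases hx with ((((((((((h|h)|h)|h)|h)|h)|h)|h)|h)|h)|h) <;> subst h <;>
        simp [ih] <;> omega
    · rw [Bool.not_eq_true] at hx
      rw [hx]
      have hne : ∀ c : Char, pvIsNamed c = true → x ≠ c := by
        intro c hc he
        rw [he, hc] at hx
        simp at hx
      simp [hne '.' (by decide), hne ',' (by decide), hne ':' (by decide), hne ';' (by decide),
        hne '?' (by decide), hne '!' (by decide), hne '-' (by decide), hne '\"' (by decide),
        hne '\'' (by decide), hne '(' (by decide), hne ')' (by decide), ih]

-- A's Otherp value equals the directly counted one
lemma pv_otherp (l : List Char) :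
    (l.countP (fun c => pvPunct.contains c) : Int)
      - ((l.count '.' : Int) + (l.count ',' : Int) + (l.count ':' : Int) + (l.count ';' : Int)
         + (l.count '?' : Int) + (l.count '!' : Int) + (l.count '-' : Int) + (l.count '"' : Int)
         + (l.count '\'' : Int) + ((l.count '(' : Int) + (l.count ')' : Int)))
      = (l.countP (fun c => pvPunct.contains c && !(pvIsNamed c)) : Int) := by
  have hsplit := pv_countP_split l (fun c => pvPunct.contains c) pvIsNamed
  have hin : l.countP (fun c => pvPunct.contains c && pvIsNamed c) = l.countP pvIsNamed := by
    apply List.countP_congr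
    intro c _
    by_cases h : pvIsNamed c = true
    · simp [h, pv_named_mem c h]
    · simp [h]
  have hnamed := pv_countP_named l
  rw [hin] at hsplit
  omega

-- ===== VERDICT (by name: the statement is the Claim_ definition above) =====
theorem get_punct_features_spec : Claim_equal_get_punct_features := by
  intro document _
  unfold Spec_get_punct_features get_punct_features get_punct_features_alt
  rw [pv_fold_eq]
  set l := document.toList with hl
  have hlen : (l.filter (fun c => pvPunct.contains c)).length
      = l.countP (fun c => pvPunct.contains c) := List.countP_eq_length_filter.symm
  have hc : ∀ v : Char, pvPunct.contains v = true →
      ((l.filter (fun c => pvPunct.contains c)).count v : Int) = (l.count v : Int) := by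
    intro v hv; exact_mod_cast congrArg Nat.cast (pv_count_filter l v hv)
  simp only [List.map_cons, List.map_nil, List.sum_cons, List.sum_nil, hlen]
  rw [hc '.' (by decide), hc ',' (by decide), hc ':' (by decide), hc ';' (by decide),
      hc '?' (by decide), hc '!' (by decide), hc '-' (by decide), hc '"' (by decide),
      hc '\'' (by decide), hc '(' (by decide), hc ')' (by decide)]
  have hot := pv_otherp l
  simp only [pvAdd, pvOf]
  simp only [zero_add, add_zero, List.cons_append, List.nil_append, List.cons.injEq,
    Prod.mk.injEq, and_true, true_and]
  omega
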